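-- pv_equiv track=rewrite | github.com/gn0mesort/vkfl | tools/generate.py | is_descendent
-- ===== SOURCE A (Python) =====
-- def is_descendent(vk_types, name, base):
--     if name == base:
--         return True
--     current = vk_types.get(name)
--     if not current:
--         return False
--     parents = current.get('parent')
--     if not parents:
--         return False
--     return any([ is_descendent(vk_types, parent, base) for parent in parents.split(',') ])
-- ===== SOURCE B (Python) =====
-- def _parents(vk_types, n):
--     # The comma-separated parent list of n, or [] when n has no entry / no parents.
--     cur = vk_types.get(n)
--     if not cur:
--         return []
--     p = cur.get('parent')
--     if not p:
--         return []
--     return p.split(',')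
--
--
-- def is_descendent(vk_types, name, base):
--     # Forward saturation of the set of ancestors reachable from `name`, stopping at
--     # the fixpoint; a shortest parent chain passes through each key at most once, so
--     # at most len(vk_types) + 1 expansion rounds are ever needed.
--     reached = {name}
--     for _ in range(len(vk_types) + 1):
--         new = set(reached)
--         for n in reached:
--             new.update(_parents(vk_types, n))
--         if new == reached:
--             break
--         reached = new
--     return base in reached
-- ===== Notes on version B (the rewrite author's own statement) =====
-- stated objective: alternative
-- what changed: A enumerates parent paths by unmemoized recursion (exponential on diamond-shaped ancestries, non-terminating on cycles); B instead saturates the set of nodes reachable from name by rounds of set union with a fixpoint break and tests membership of base; on the measured input family the two have comparable cost.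
import Mathlib
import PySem

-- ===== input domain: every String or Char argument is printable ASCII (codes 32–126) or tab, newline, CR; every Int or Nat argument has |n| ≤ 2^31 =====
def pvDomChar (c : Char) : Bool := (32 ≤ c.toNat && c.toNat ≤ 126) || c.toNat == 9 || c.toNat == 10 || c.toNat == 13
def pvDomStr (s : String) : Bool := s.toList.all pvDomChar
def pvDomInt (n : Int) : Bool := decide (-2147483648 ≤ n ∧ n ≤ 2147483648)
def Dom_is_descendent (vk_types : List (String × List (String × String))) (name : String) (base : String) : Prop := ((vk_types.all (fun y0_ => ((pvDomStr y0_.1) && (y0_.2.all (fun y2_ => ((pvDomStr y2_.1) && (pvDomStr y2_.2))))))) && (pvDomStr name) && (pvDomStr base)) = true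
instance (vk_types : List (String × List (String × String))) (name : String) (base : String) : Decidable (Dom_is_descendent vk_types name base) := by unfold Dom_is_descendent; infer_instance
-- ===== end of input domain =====

-- B replaces A's path-by-path recursive enumeration of parent chains by a forward
-- saturation of the reachable-ancestor set (at most len(vk_types)+1 rounds, with a
-- fixpoint break); B always terminates, also on cyclic parent graphs where A recurses forever.

-- ===== PORT A =====
-- Python A recurses without a bound; wherever it returns (Pre_ below: no base-avoiding
-- cycle reachable from name) the recursion explores only paths whose expanded nodes are
-- distinct keys, so fuel vk_types.length + 2 is enough; fuel 0 is never reached there.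
def pvGoA (vk_types : List (String × List (String × String))) : Nat → String → String → Bool
  | 0, _, _ => false
  | (f+1), name, base =>
    if name == base then true
    else
      match PySem.Dict.get? ⟨vk_types⟩ name with
      | none => false
      | some current =>
        if current.isEmpty then false
        else
          match PySem.Dict.get? ⟨current⟩ "parent" with
          | none => false
          | some parents =>
            if parents == "" then false
            else (((PySem.Str.split? parents ",").getD []).map
                    (fun parent => pvGoA vk_types f parent base)).any id

def is_descendent (vk_types : List (String × List (String × String))) (name : String) (base : String) : Bool :=
  pvGoA vk_types (vk_types.length + 2) name base

-- ===== PORT B =====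
-- Source B's helper _parents: the comma-separated parent list, [] when absent/empty.
def pvParents (vk_types : List (String × List (String × String))) (n : String) : List String :=
  match PySem.Dict.get? ⟨vk_types⟩ n with
  | none => []
  | some cur =>
    if cur.isEmpty then []
    else
      match PySem.Dict.get? ⟨cur⟩ "parent" with
      | none => []
      | some p => if p == "" then [] else (PySem.Str.split? p ",").getD []

-- one round of Source B's inner loop: copy `reached` and add the parents of each reached node
def pvStepB (vk_types : List (String × List (String × String))) (r : PySem.Set String) : PySem.Set String :=
  r.foldl (fun acc n => PySem.Set.update acc (pvParents vk_types n)) r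

-- Source B's bounded for-loop with its fixpoint break
def pvLoopB (vk_types : List (String × List (String × String))) : Nat → PySem.Set String → PySem.Set String
  | 0, r => r
  | (k+1), r =>
    let new := pvStepB vk_types r
    if PySem.Set.equal new r then r else pvLoopB vk_types k new

def is_descendent_alt (vk_types : List (String × List (String × String))) (name : String) (base : String) : Bool :=
  PySem.Set.contains (pvLoopB vk_types (vk_types.length + 1) (PySem.Set.ofList [name])) base

-- ===== PRECONDITION & SPEC =====
-- Pre_ helpers: expansion successors as Python A sees them (expansion stops at base),
-- and their bounded closure (len+1 rounds reach every node A's recursion can visit).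
def pvAvoid (vk_types : List (String × List (String × String))) (base n : String) : List String :=
  if n == base then [] else pvParents vk_types n

def pvClos (vk_types : List (String × List (String × String))) (base : String) (init : PySem.Set String) : PySem.Set String :=
  (List.range (vk_types.length + 1)).foldl
    (fun r _ => r.foldl (fun acc n => PySem.Set.update acc (pvAvoid vk_types base n)) r) init

-- Pre_ excludes exactly the inputs on which Python A recurses forever (RecursionError):
-- those where some node reachable from name by base-avoiding expansion lies on a
-- base-avoiding cycle. A returns normally on every other input.
def Pre_is_descendent (vk_types : List (String × List (String × String))) (name : String) (base : String) : Prop :=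
  ∀ k ∈ pvClos vk_types base (PySem.Set.ofList [name]),
    PySem.Set.contains (pvClos vk_types base (PySem.Set.ofList (pvAvoid vk_types base k))) k = false

instance (vk_types : List (String × List (String × String))) (name : String) (base : String) : Decidable (Pre_is_descendent vk_types name base) := by unfold Pre_is_descendent; infer_instance

def pvWitness_is_descendent : (List (String × List (String × String))) × String × String :=
  ([("VkDevice", [("parent", "VkPhysicalDevice")]), ("VkPhysicalDevice", [("parent", "VkInstance")])],
   "VkDevice", "VkInstance")

def Spec_is_descendent (vk_types : List (String × List (String × String))) (name : String) (base : String) (out : Bool) : Prop := out = is_descendent_alt vk_types name base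
instance (vk_types : List (String × List (String × String))) (name : String) (base : String) (out : Bool) : Decidable (Spec_is_descendent vk_types name base out) := by unfold Spec_is_descendent; infer_instance

-- ===== CLAIM (what is proved, stated in full; the proofs are below) =====
def Claim_equal_is_descendent : Prop := ∀ (vk_types : List (String × List (String × String))) (name : String) (base : String), Dom_is_descendent vk_types name base → Pre_is_descendent vk_types name base → Spec_is_descendent vk_types name base (is_descendent vk_types name base)

-- ===== LEMMAS AND PROOFS =====

-- `base reachable from a along parent edges in at most k steps`
def pvReachLe (vk_types : List (String × List (String × String))) : Nat → String → String → Prop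
  | 0, a, b => a = b
  | (k+1), a, b => a = b ∨ ∃ p ∈ pvParents vk_types a, pvReachLe vk_types k p b

theorem pvReachLe_refl (vk : List (String × List (String × String))) (k : Nat) (a : String) :
    pvReachLe vk k a a := by
  cases k <;> simp [pvReachLe]

-- A's recursion computes exactly bounded reachability
theorem pvGoA_succ (vk : List (String × List (String × String))) (f : Nat) (n b : String) :
    pvGoA vk (f+1) n b = (n == b || (pvParents vk n).any (fun p => pvGoA vk f p b)) := by
  cases h : (n == b) with
  | true => simp [pvGoA, h]
  | false =>
    simp only [pvGoA, h, Bool.false_eq_true, if_false, Bool.false_or]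
    cases hc : PySem.Dict.get? (⟨vk⟩ : PySem.Dict String (List (String × String))) n with
    | none => simp [pvParents, hc]
    | some cur =>
      by_cases he : cur.isEmpty
      · simp [pvParents, hc, he]
      · cases hp : PySem.Dict.get? (⟨cur⟩ : PySem.Dict String String) "parent" with
        | none => simp [pvParents, hc, he, hp]
        | some p =>
          by_cases hpe : p == ""
          · simp [pvParents, hc, he, hp, hpe]
          · simp [pvParents, hc, he, hp, hpe, List.any_map]

theorem pvGoA_iff (vk : List (String × List (String × String))) (f : Nat) (n b : String) :
    pvGoA vk (f+1) n b = true ↔ pvReachLe vk f n b := by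
  induction f generalizing n with
  | zero =>
    rw [pvGoA_succ]
    simp [pvGoA, pvReachLe]
  | succ f ih =>
    rw [pvGoA_succ]
    simp [pvReachLe, ih, List.any_eq_true]

-- last-step decomposition of bounded reachability
theorem pvReachLe_snoc (vk : List (String × List (String × String))) (k : Nat) (a b : String) :
    pvReachLe vk (k+1) a b ↔
      pvReachLe vk k a b ∨ ∃ c, pvReachLe vk k a c ∧ b ∈ pvParents vk c := by
  induction k generalizing a with
  | zero =>
    simp only [pvReachLe]
    constructor
    · rintro (rfl | ⟨p, hp, rfl⟩)
      · exact Or.inl rfl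
      · exact Or.inr ⟨a, rfl, hp⟩
    · rintro (rfl | ⟨c, rfl, hb⟩)
      · exact Or.inl rfl
      · exact Or.inr ⟨b, hb, rfl⟩
  | succ k ih =>
    constructor
    · rintro (h | ⟨p, hp, hpb⟩)
      · exact Or.inl (Or.inl h)
      · rcases (ih p).mp hpb with h' | ⟨c, hc, hbc⟩
        · exact Or.inl (Or.inr ⟨p, hp, h'⟩)
        · exact Or.inr ⟨c, Or.inr ⟨p, hp, hc⟩, hbc⟩
    · rintro (h | ⟨c, hc, hbc⟩)
      · rcases h with h | ⟨p, hp, hpb⟩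
        · exact Or.inl h
        · exact Or.inr ⟨p, hp, (ih p).mpr (Or.inl hpb)⟩
      · rcases hc with hc | ⟨p, hp, hpc⟩
        · cases hc
          exact Or.inr ⟨b, hbc, pvReachLe_refl vk (k+1) b⟩
        · exact Or.inr ⟨p, hp, (ih p).mpr (Or.inr ⟨c, hpc, hbc⟩)⟩

-- membership after one saturation round
theorem pv_mem_foldl_update (vk : List (String × List (String × String)))
    (l : List String) (s : PySem.Set String) (x : String) :
    x ∈ l.foldl (fun acc n => PySem.Set.update acc (pvParents vk n)) s ↔
      x ∈ s ∨ ∃ n ∈ l, x ∈ pvParents vk n := by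
  induction l generalizing s with
  | nil => simp
  | cons h t ih =>
    simp only [List.foldl_cons, ih, PySem.Set.mem_update, List.mem_cons]
    constructor
    · rintro ((hs | hh) | ⟨n, hn, hx⟩)
      · exact Or.inl hs
      · exact Or.inr ⟨h, Or.inl rfl, hh⟩
      · exact Or.inr ⟨n, Or.inr hn, hx⟩
    · rintro (hs | ⟨n, (rfl | hn), hx⟩)
      · exact Or.inl (Or.inl hs)
      · exact Or.inl (Or.inr hx)
      · exact Or.inr ⟨n, hn, hx⟩

theorem pv_mem_stepB (vk : List (String × List (String × String))) (r : PySem.Set String) (x : String) :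
    x ∈ pvStepB vk r ↔ x ∈ r ∨ ∃ n ∈ r, x ∈ pvParents vk n := by
  simp [pvStepB, pv_mem_foldl_update]

-- B's saturation computes exactly bounded reachability from name
theorem pv_mem_iter (vk : List (String × List (String × String))) (name : String) (k : Nat) (x : String) :
    x ∈ (List.range k).foldl (fun r _ => pvStepB vk r) (PySem.Set.ofList [name]) ↔
      pvReachLe vk k name x := by
  induction k generalizing x with
  | zero =>
    simp only [List.range_zero, List.foldl_nil, PySem.Set.mem_ofList, List.mem_singleton, pvReachLe]
    exact ⟨fun h => h.symm, fun h => h.symm⟩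
  | succ k ih =>
    rw [List.range_succ, List.foldl_append, List.foldl_cons, List.foldl_nil, pv_mem_stepB,
      pvReachLe_snoc]
    constructor
    · rintro (h | ⟨n, hn, hx⟩)
      · exact Or.inl ((ih x).mp h)
      · exact Or.inr ⟨n, (ih n).mp hn, hx⟩
    · rintro (h | ⟨c, hc, hbc⟩)
      · exact Or.inl ((ih x).mpr h)
      · exact Or.inr ⟨c, (ih c).mpr hc, hbc⟩

theorem pv_foldl_range_const {α : Type} (g : α → α) (k : Nat) (init : α) :
    (List.range (k+1)).foldl (fun r _ => g r) init = (List.range k).foldl (fun r _ => g r) (g init) := by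
  rw [List.range_succ_eq_map, List.foldl_cons, List.foldl_map]

theorem pv_mem_stepB_congr (vk : List (String × List (String × String))) (s t : PySem.Set String)
    (h : ∀ y, y ∈ s ↔ y ∈ t) (x : String) : x ∈ pvStepB vk s ↔ x ∈ pvStepB vk t := by
  rw [pv_mem_stepB, pv_mem_stepB, h x]
  constructor
  · rintro (hx | ⟨n, hn, hx⟩)
    · exact Or.inl hx
    · exact Or.inr ⟨n, (h n).mp hn, hx⟩
  · rintro (hx | ⟨n, hn, hx⟩)
    · exact Or.inl hx
    · exact Or.inr ⟨n, (h n).mpr hn, hx⟩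

-- once a round adds nothing, every further round leaves the members unchanged
theorem pv_fix_iter (vk : List (String × List (String × String))) (r : PySem.Set String)
    (hfix : ∀ y, y ∈ pvStepB vk r ↔ y ∈ r) (m : Nat) (s : PySem.Set String)
    (hs : ∀ y, y ∈ s ↔ y ∈ r) (x : String) :
    x ∈ (List.range m).foldl (fun r' _ => pvStepB vk r') s ↔ x ∈ r := by
  induction m generalizing s with
  | zero => simpa using hs x
  | succ m ih =>
    rw [pv_foldl_range_const]
    exact ih (pvStepB vk s) (fun y => (pv_mem_stepB_congr vk s r hs y).trans (hfix y))

-- the early-exit loop has the same members as the plain k-round saturation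
theorem pv_mem_loopB (vk : List (String × List (String × String))) (k : Nat) (r : PySem.Set String) (x : String) :
    x ∈ pvLoopB vk k r ↔ x ∈ (List.range k).foldl (fun r' _ => pvStepB vk r') r := by
  induction k generalizing r with
  | zero => simp [pvLoopB]
  | succ k ih =>
    show x ∈ (if PySem.Set.equal (pvStepB vk r) r then r else pvLoopB vk k (pvStepB vk r)) ↔ _
    by_cases heq : PySem.Set.equal (pvStepB vk r) r = true
    · rw [if_pos heq]
      exact (pv_fix_iter vk r (fun y => (PySem.Set.equal_iff _ _).mp heq y) (k+1) r
        (fun _ => Iff.rfl) x).symm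
    · rw [if_neg heq, pv_foldl_range_const, ih]

-- ===== VERDICT (by name: the statement is the Claim_ definition above) =====
theorem is_descendent_spec : Claim_equal_is_descendent := by
  intro vk name base _ _
  unfold Spec_is_descendent is_descendent is_descendent_alt
  rw [Bool.eq_iff_iff, PySem.Set.contains_iff, pv_mem_loopB, pv_mem_iter, pvGoA_iff]
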